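-- pv_equiv track=rewrite | github.com/robocorp/robotframework-lsp | robocorp-python-ls-core/src/robocorp_ls_core/libs/robocop_lib/robocop/utils/misc.py | find_robot_vars
-- ===== SOURCE A (Python) =====
-- from typing import Dict, List, Optional, Pattern, Tuple
--
-- def next_char_is(string: str, i: int, char: str) -> bool:
--     if not i < len(string) - 1:
--         return False
--     return string[i + 1] == char
--
-- def find_robot_vars(name: str) -> List[Tuple[int, int]]:
--     """return list of tuples with (start, end) pos of vars in name"""
--     var_start = set("$@%&")
--     brackets = 0
--     index = 0
--     start = -1
--     variables = []
--     while index < len(name):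
--         if brackets:
--             if name[index] == "{":
--                 brackets += 1
--             elif name[index] == "}":
--                 brackets -= 1
--                 if not brackets:
--                     variables.append((start, index + 1))
--         # it looks for $ (or other var starter) and then check if next char is { and previous is not escape \
--         elif name[index] in var_start and next_char_is(name, index, "{") and not (index and name[index - 1] == "\\"):
--             brackets += 1
--             start = index
--             index += 1
--         index += 1
--     return variables
-- ===== SOURCE B (Python) =====
-- def find_robot_vars(name):
--     """return list of tuples with (start, end) pos of vars in name"""
--     variables = []
--     n = len(name)
--     i = 0
--     while i < n:
--         if (name[i] in "$@%&" and i < n - 1 and name[i + 1] == "{"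
--                 and not (i and name[i - 1] == "\\")):
--             count = 1
--             j = i + 2
--             closed = None
--             while j < n:
--                 c = name[j]
--                 if c == "{":
--                     count += 1
--                 elif c == "}":
--                     count -= 1
--                 if count == 0:
--                     closed = j
--                     break
--                 j += 1
--             if closed is None:
--                 break
--             variables.append((i, closed + 1))
--             i = closed + 1
--         else:
--             i += 1
--     return variables
-- ===== Notes on version B (the rewrite author's own statement) =====
-- stated objective: alternative
-- what changed: A threads a single brace-depth counter through one flat while-loop state machine over the whole string; B uses an outer scan that looks only for variable starts and, on each hit, runs a dedicated inner loop that counts braces to the matching closing brace, then resumes the outer scan past it.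
import Mathlib
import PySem

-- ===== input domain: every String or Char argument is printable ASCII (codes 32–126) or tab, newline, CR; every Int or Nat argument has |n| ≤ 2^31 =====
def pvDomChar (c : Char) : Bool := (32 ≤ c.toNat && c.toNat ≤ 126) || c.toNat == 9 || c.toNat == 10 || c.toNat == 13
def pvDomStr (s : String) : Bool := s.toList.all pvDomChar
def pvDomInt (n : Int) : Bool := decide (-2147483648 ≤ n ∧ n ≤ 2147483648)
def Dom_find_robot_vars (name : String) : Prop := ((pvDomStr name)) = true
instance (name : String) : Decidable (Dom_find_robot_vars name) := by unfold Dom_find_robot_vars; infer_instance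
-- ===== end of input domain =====

-- B replaces A's single flat state machine (the 'brackets' counter threaded through one loop)
-- by an outer scan for variable starts with a dedicated inner brace-counting loop; objective: alternative decomposition.
-- While loops are encoded with a fuel parameter (fuel = length of the string is always sufficient: the index strictly increases).

-- ===== PORT A =====
-- next_char_is(string, i, char)
def nextCharIs (cs : List Char) (i : Nat) (c : Char) : Bool :=
  if i < cs.length - 1 then cs.getD (i + 1) ' ' == c else false

-- the while loop of A, state (brackets, index, start, variables)
def findA_go (cs : List Char) (fuel : Nat) (brackets : Int) (index : Nat) (start : Int)
    (acc : List (Int × Int)) : List (Int × Int) :=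
  match fuel with
  | 0 => acc
  | fuel + 1 =>
    if index < cs.length then
      if brackets ≠ 0 then
        if cs.getD index ' ' = '{' then
          findA_go cs fuel (brackets + 1) (index + 1) start acc
        else if cs.getD index ' ' = '}' then
          if brackets - 1 = 0 then
            findA_go cs fuel (brackets - 1) (index + 1) start (acc ++ [(start, (index : Int) + 1)])
          else
            findA_go cs fuel (brackets - 1) (index + 1) start acc
        else
          findA_go cs fuel brackets (index + 1) start acc
      else if (cs.getD index ' ' ∈ ['$', '@', '%', '&']) ∧ nextCharIs cs index '{' = true
              ∧ ¬ (index ≠ 0 ∧ cs.getD (index - 1) ' ' = '\\') then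
        -- brackets += 1; start = index; index += 1; then the loop's index += 1
        findA_go cs fuel 1 (index + 2) (index : Int) acc
      else
        findA_go cs fuel brackets (index + 1) start acc
    else acc

def find_robot_vars (name : String) : List (Int × Int) :=
  findA_go name.toList name.toList.length 0 0 (-1) []

-- ===== PORT B =====
-- inner loop: from position j with open-brace count, return the position of the balancing '}'
def findB_inner (cs : List Char) (fuel : Nat) (j : Nat) (count : Int) : Option Nat :=
  match fuel with
  | 0 => none
  | fuel + 1 =>
    if j < cs.length then
      let count' := if cs.getD j ' ' = '{' then count + 1
                    else if cs.getD j ' ' = '}' then count - 1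
                    else count
      if count' = 0 then some j else findB_inner cs fuel (j + 1) count'
    else none

-- outer loop: scan for a variable start, delegate brace matching to findB_inner
def findB_outer (cs : List Char) (fuel : Nat) (i : Nat) (acc : List (Int × Int)) :
    List (Int × Int) :=
  match fuel with
  | 0 => acc
  | fuel + 1 =>
    if i < cs.length then
      if (cs.getD i ' ' ∈ ['$', '@', '%', '&']) ∧ (i < cs.length - 1 ∧ cs.getD (i + 1) ' ' = '{')
          ∧ ¬ (i ≠ 0 ∧ cs.getD (i - 1) ' ' = '\\') then
        match findB_inner cs cs.length (i + 2) 1 with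
        | some j => findB_outer cs fuel (j + 1) (acc ++ [((i : Int), (j : Int) + 1)])
        | none => acc
      else
        findB_outer cs fuel (i + 1) acc
    else acc

def find_robot_vars_alt (name : String) : List (Int × Int) :=
  findB_outer name.toList name.toList.length 0 []

-- ===== PRECONDITION & SPEC =====
def Spec_find_robot_vars (name : String) (out : List (Int × Int)) : Prop := out = find_robot_vars_alt name
instance (name : String) (out : List (Int × Int)) : Decidable (Spec_find_robot_vars name out) := by unfold Spec_find_robot_vars; infer_instance

-- ===== CLAIM (what is proved, stated in full; the proofs are below) =====
def Claim_equal_find_robot_vars : Prop := ∀ (name : String), Dom_find_robot_vars name → Spec_find_robot_vars name (find_robot_vars name)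

-- ===== LEMMAS AND PROOFS =====

-- fuel is irrelevant once it covers the remaining string (A's loop)
theorem findA_go_fuel (cs : List Char) (f f' : Nat) (b : Int) (i : Nat) (start : Int)
    (acc : List (Int × Int)) (hf : cs.length - i ≤ f) (hf' : cs.length - i ≤ f') :
    findA_go cs f b i start acc = findA_go cs f' b i start acc := by
  induction f generalizing f' b i start acc with
  | zero =>
      have hi : ¬ i < cs.length := by omega
      cases f' with
      | zero => rfl
      | succ f' => rw [findA_go, findA_go, if_neg hi]
  | succ f ih =>
      cases f' with
      | zero =>
          have hi : ¬ i < cs.length := by omega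
          rw [findA_go, findA_go, if_neg hi]
      | succ f' =>
          rw [findA_go, findA_go]
          by_cases hi : i < cs.length
          · simp only [if_pos hi]
            by_cases hb0 : b ≠ 0
            · simp only [if_pos hb0]
              by_cases h1 : cs.getD i ' ' = '{'
              · simp only [List.getD] at h1
                simp only [List.getD, if_pos h1]
                exact ih f' (b + 1) (i + 1) start acc (by omega) (by omega)
              · by_cases h2 : cs.getD i ' ' = '}'
                · simp only [List.getD] at h1 h2
                  simp only [List.getD, if_neg h1, if_pos h2]
                  by_cases h3 : b - 1 = 0
                  · simp only [if_pos h3]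
                    exact ih f' (b - 1) (i + 1) start _ (by omega) (by omega)
                  · simp only [if_neg h3]
                    exact ih f' (b - 1) (i + 1) start acc (by omega) (by omega)
                · simp only [List.getD] at h1 h2
                  simp only [List.getD, if_neg h1, if_neg h2]
                  exact ih f' b (i + 1) start acc (by omega) (by omega)
            · simp only [if_neg hb0]
              by_cases hc : (cs.getD i ' ' ∈ ['$', '@', '%', '&']) ∧ nextCharIs cs i '{' = true
                  ∧ ¬ (i ≠ 0 ∧ cs.getD (i - 1) ' ' = '\\')
              · simp only [if_pos hc]
                exact ih f' 1 (i + 2) (i : Int) acc (by omega) (by omega)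
              · simp only [if_neg hc]
                exact ih f' b (i + 1) start acc (by omega) (by omega)
          · simp only [if_neg hi]

-- fuel is irrelevant once it covers the remaining string (B's inner loop)
theorem findB_inner_fuel (cs : List Char) (f f' : Nat) (j : Nat) (c : Int)
    (hf : cs.length - j ≤ f) (hf' : cs.length - j ≤ f') :
    findB_inner cs f j c = findB_inner cs f' j c := by
  induction f generalizing f' j c with
  | zero =>
      have hj : ¬ j < cs.length := by omega
      cases f' with
      | zero => rfl
      | succ f' => rw [findB_inner, findB_inner, if_neg hj]
  | succ f ih =>
      cases f' with
      | zero =>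
          have hj : ¬ j < cs.length := by omega
          rw [findB_inner, findB_inner, if_neg hj]
      | succ f' =>
          rw [findB_inner, findB_inner]
          by_cases hj : j < cs.length
          · simp only [if_pos hj]
            by_cases h1 : cs.getD j ' ' = '{'
            · simp only [List.getD] at h1
              simp only [List.getD, if_pos h1]
              by_cases h0 : c + 1 = 0
              · simp only [if_pos h0]
              · simp only [if_neg h0]
                exact ih f' (j + 1) (c + 1) (by omega) (by omega)
            · by_cases h2 : cs.getD j ' ' = '}'
              · simp only [List.getD] at h1 h2
                simp only [List.getD, if_neg h1, if_pos h2]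
                by_cases h0 : c - 1 = 0
                · simp only [if_pos h0]
                · simp only [if_neg h0]
                  exact ih f' (j + 1) (c - 1) (by omega) (by omega)
              · simp only [List.getD] at h1 h2
                simp only [List.getD, if_neg h1, if_neg h2]
                by_cases h0 : c = 0
                · simp only [if_pos h0]
                · simp only [if_neg h0]
                  exact ih f' (j + 1) c (by omega) (by omega)
          · simp only [if_neg hj]

-- a successful inner search ends at or after its start, inside the string
theorem findB_inner_ge (cs : List Char) (f : Nat) (j : Nat) (c : Int) (k : Nat)
    (h : findB_inner cs f j c = some k) : j ≤ k ∧ k < cs.length := by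
  induction f generalizing j c with
  | zero => simp [findB_inner] at h
  | succ f ih =>
      rw [findB_inner] at h
      by_cases hj : j < cs.length
      · simp only [if_pos hj] at h
        by_cases h1 : cs.getD j ' ' = '{'
        · simp only [List.getD] at h1
          simp only [List.getD, if_pos h1] at h
          by_cases h0 : c + 1 = 0
          · simp only [if_pos h0, Option.some.injEq] at h
            omega
          · simp only [if_neg h0] at h
            have := ih (j + 1) (c + 1) h
            omega
        · by_cases h2 : cs.getD j ' ' = '}'
          · simp only [List.getD] at h1 h2
            simp only [List.getD, if_neg h1, if_pos h2] at h
            by_cases h0 : c - 1 = 0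
            · simp only [if_pos h0, Option.some.injEq] at h
              omega
            · simp only [if_neg h0] at h
              have := ih (j + 1) (c - 1) h
              omega
          · simp only [List.getD] at h1 h2
            simp only [List.getD, if_neg h1, if_neg h2] at h
            by_cases h0 : c = 0
            · simp only [if_pos h0, Option.some.injEq] at h
              omega
            · simp only [if_neg h0] at h
              have := ih (j + 1) c h
              omega
      · simp [if_neg hj] at h

-- A's brackets≥1 phase computes exactly what findB_inner finds (same fuel on both sides)
theorem findA_inner_eq (cs : List Char) (f : Nat) (i : Nat) (b : Int) (start : Int)
    (acc : List (Int × Int)) (hf : cs.length - i ≤ f) (hb : 1 ≤ b) :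
    findA_go cs f b i start acc =
      match findB_inner cs f i b with
      | some j => findA_go cs (cs.length - (j + 1)) 0 (j + 1) start
          (acc ++ [(start, (j : Int) + 1)])
      | none => acc := by
  induction f generalizing i b acc with
  | zero => rw [findA_go, findB_inner]
  | succ f ih =>
      rw [findA_go, findB_inner]
      by_cases hi : i < cs.length
      · have hb' : b ≠ 0 := by omega
        simp only [if_pos hi, if_pos hb']
        by_cases h1 : cs.getD i ' ' = '{'
        · have hne : ¬ (b + 1 = 0) := by omega
          simp only [List.getD] at h1
          simp only [List.getD, if_pos h1, if_neg hne]
          exact ih (i + 1) (b + 1) acc (by omega) (by omega)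
        · by_cases h2 : cs.getD i ' ' = '}'
          · by_cases h3 : b - 1 = 0
            · simp only [List.getD] at h1 h2
              simp only [List.getD, if_neg h1, if_pos h2, h3, if_true]
              show findA_go cs f 0 (i + 1) start (acc ++ [(start, (i : Int) + 1)]) =
                findA_go cs (cs.length - (i + 1)) 0 (i + 1) start
                  (acc ++ [(start, (i : Int) + 1)])
              exact findA_go_fuel cs f (cs.length - (i + 1)) 0 (i + 1) start _
                (by omega) (by omega)
            · simp only [List.getD] at h1 h2
              simp only [List.getD, if_neg h1, if_pos h2, if_neg h3]
              exact ih (i + 1) (b - 1) acc (by omega) (by omega)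
          · simp only [List.getD] at h1 h2
            simp only [List.getD, if_neg h1, if_neg h2, if_neg hb']
            exact ih (i + 1) b acc (by omega) hb
      · simp only [if_neg hi]

-- A's brackets=0 phase equals B's outer loop (start is dead state there)
theorem findA_outer_eq (cs : List Char) (f fB : Nat) (i : Nat) (start : Int)
    (acc : List (Int × Int)) (hf : cs.length - i ≤ f) (hfB : cs.length - i ≤ fB) :
    findA_go cs f 0 i start acc = findB_outer cs fB i acc := by
  induction f generalizing fB i start acc with
  | zero =>
      have hi : ¬ i < cs.length := by omega
      cases fB with
      | zero => rw [findA_go, findB_outer]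
      | succ fB => rw [findA_go, findB_outer, if_neg hi]
  | succ f ih =>
      cases fB with
      | zero =>
          have hi : ¬ i < cs.length := by omega
          rw [findA_go, findB_outer, if_neg hi]
      | succ fB =>
          rw [findA_go, findB_outer]
          by_cases hi : i < cs.length
          · have hz : ¬ ((0 : Int) ≠ 0) := by simp
            simp only [if_pos hi, if_neg hz]
            have hcond : ((cs.getD i ' ' ∈ ['$', '@', '%', '&']) ∧ nextCharIs cs i '{' = true
                  ∧ ¬ (i ≠ 0 ∧ cs.getD (i - 1) ' ' = '\\'))
                ↔ ((cs.getD i ' ' ∈ ['$', '@', '%', '&'])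
                  ∧ (i < cs.length - 1 ∧ cs.getD (i + 1) ' ' = '{')
                  ∧ ¬ (i ≠ 0 ∧ cs.getD (i - 1) ' ' = '\\')) := by
              unfold nextCharIs
              constructor
              · rintro ⟨ha, hb, hc⟩
                refine ⟨ha, ?_, hc⟩
                by_cases h : i < cs.length - 1
                · simp only [if_pos h] at hb
                  exact ⟨h, by simpa using hb⟩
                · simp [if_neg h] at hb
              · rintro ⟨ha, ⟨h, hb⟩, hc⟩
                refine ⟨ha, ?_, hc⟩
                rw [if_pos h]
                simp only [beq_iff_eq]
                exact hb
            by_cases hc : (cs.getD i ' ' ∈ ['$', '@', '%', '&']) ∧ nextCharIs cs i '{' = true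
                ∧ ¬ (i ≠ 0 ∧ cs.getD (i - 1) ' ' = '\\')
            · rw [if_pos hc, if_pos (hcond.mp hc)]
              rw [findA_inner_eq cs f (i + 2) 1 (i : Int) acc (by omega) (by omega)]
              rw [findB_inner_fuel cs cs.length f (i + 2) 1 (by omega) (by omega)]
              cases hm : findB_inner cs f (i + 2) 1 with
              | some j =>
                  have hj := findB_inner_ge cs f (i + 2) 1 j hm
                  show findA_go cs (cs.length - (j + 1)) 0 (j + 1) (i : Int)
                      (acc ++ [((i : Int), (j : Int) + 1)]) =
                    findB_outer cs fB (j + 1) (acc ++ [((i : Int), (j : Int) + 1)])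
                  rw [findA_go_fuel cs (cs.length - (j + 1)) f 0 (j + 1) (i : Int) _
                    (by omega) (by omega)]
                  exact ih fB (j + 1) (i : Int) (acc ++ [((i : Int), (j : Int) + 1)])
                    (by omega) (by omega)
              | none => rfl
            · rw [if_neg hc, if_neg (fun h => hc (hcond.mpr h))]
              exact ih fB (i + 1) start acc (by omega) (by omega)
          · simp only [if_neg hi]

-- ===== VERDICT (by name: the statement is the Claim_ definition above) =====
theorem find_robot_vars_spec : Claim_equal_find_robot_vars := by
  intro name _
  unfold Spec_find_robot_vars find_robot_vars find_robot_vars_alt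
  exact findA_outer_eq name.toList name.toList.length name.toList.length 0 (-1) []
    (by omega) (by omega)
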